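-- pv_equiv track=rewrite | github.com/kcc3/hackerrank-solutions | problem_solving/python/algorithms/greedy/priyanka_and_toys.py | toys
-- ===== SOURCE A (Python) =====
-- def toys(w):
--     """Hackerrank Problem: https://www.hackerrank.com/challenges/priyanka-and-toys/problem
--
--     Priyanka works for an international toy company that ships by container. Her task is to the determine the lowest
--     cost way to combine her orders for shipping. She has a list of item weights. The shipping company has a requirement
--     that all items loaded in a container must weigh less than or equal to 4 units plus the weight of the minimum weight
--     item. All items meeting that requirement will be shipped in one container.
--
--     Solve:
--         We sort the array, and then we iterate through the list seeing if each order fits within the current lowest order's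
--         weight.  If it does, we can continue on, and if it doesn't, we then create a new "container" as this order no
--         longer fits within the previous order limit, and continue on through the orders.
--
--     Args:
--         w (list): Array representing the weighted orders
--
--     Returns:
--         int: The minimum number of containers needed to ship the orders
--     """
--     containers = 1
--     w.sort()
--     cur_lowest = w[0]
--     # Iterate through the sorted list, and add a container if the next weighted order doesn't fit within the current
--     # lowest order's weight + 4
--     for i in range(1, len(w)):
--         if w[i] > cur_lowest + 4:
--             cur_lowest = w[i]
--             containers += 1
--     return containers
-- ===== SOURCE B (Python) =====
-- import bisect
--
--
-- def toys(w):
--     """Minimum number of containers: sort w in place, then jump container-by-container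
--     with binary search (bisect_right) instead of scanning element by element."""
--     w.sort()
--     count = 0
--     i = 0
--     while i < len(w):
--         count += 1
--         i = bisect.bisect_right(w, w[i] + 4)
--     return count
-- ===== Notes on version B (the rewrite author's own statement) =====
-- stated objective: alternative
-- what changed: Replaces A's element-by-element scan maintaining the current container's minimum with a container-by-container walk that jumps each container boundary at once via binary search (bisect_right on the sorted list).
import Mathlib
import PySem

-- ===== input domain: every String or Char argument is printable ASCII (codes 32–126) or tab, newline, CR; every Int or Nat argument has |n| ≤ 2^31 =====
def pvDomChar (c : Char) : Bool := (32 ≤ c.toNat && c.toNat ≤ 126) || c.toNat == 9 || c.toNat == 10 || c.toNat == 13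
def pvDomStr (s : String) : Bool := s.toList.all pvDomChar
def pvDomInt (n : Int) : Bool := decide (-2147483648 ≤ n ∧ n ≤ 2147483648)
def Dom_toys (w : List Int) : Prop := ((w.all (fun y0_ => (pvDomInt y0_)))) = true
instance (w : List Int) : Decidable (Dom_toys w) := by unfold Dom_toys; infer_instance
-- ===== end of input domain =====

-- B walks container-by-container using binary search (bisect_right) instead of A's
-- element-by-element scan; in Python both sort the argument in place (same mutation),
-- the equivalence proved here is about the return value.

-- ===== PORT A =====
-- containers = 1; w.sort(); cur_lowest = w[0]; for the elements after index 0: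
-- if x > cur_lowest + 4 then cur_lowest = x; containers += 1
def toys (w : List Int) : Int :=
  let ws := PySem.List.sorted w (fun x => x) false
  let cur := PySem.List.pyGetD ws 0 0   -- first element; Pre_toys excludes the IndexError case
  (ws.tail.foldl
    (fun (s : Int × Int) x => if x > s.2 + 4 then (s.1 + 1, x) else s)
    (1, cur)).1

-- ===== PORT B =====
-- w.sort(); count = 0; i = 0; while i < len(w): count += 1; i = bisect_right(w, w[i] + 4)
-- fuel = len w only makes the while-loop total; on the sorted list i strictly increases
-- each step, so the fuel is never exhausted.
def toysAltGo : Nat → List Int → Nat → Int → Int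
  | 0, _, _, c => c
  | f + 1, ws, i, c =>
    if i < ws.length then
      toysAltGo f ws (PySem.List.bisectRight ws (PySem.List.pyGetD ws (i : Int) 0 + 4)) (c + 1)
    else c

def toys_alt (w : List Int) : Int :=
  let ws := PySem.List.sorted w (fun x => x) false
  toysAltGo ws.length ws 0 0

-- ===== PRECONDITION & SPEC =====
-- A indexes the first element, so it raises IndexError exactly on the empty list.
def Pre_toys (w : List Int) : Prop := w ≠ []
instance (w : List Int) : Decidable (Pre_toys w) := by unfold Pre_toys; infer_instance
def pvWitness_toys : List Int := [1, 7, 3, 21, 2]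

def Spec_toys (w : List Int) (out : Int) : Prop := out = toys_alt w
instance (w : List Int) (out : Int) : Decidable (Spec_toys w out) := by unfold Spec_toys; infer_instance

-- ===== CLAIM (what is proved, stated in full; the proofs are below) =====
def Claim_equal_toys : Prop := ∀ (w : List Int), Dom_toys w → Pre_toys w → Spec_toys w (toys w)

-- ===== LEMMAS AND PROOFS =====

-- Reference greedy count: starting from current minimum `cur`, skip the elements that fit
-- (≤ cur + 4), open a new container at the first that does not, repeat.
def gcount (cur : Int) (xs : List Int) : Int :=
  match h : xs.dropWhile (fun x => decide (x ≤ cur + 4)) with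
  | [] => 0
  | y :: ys => 1 + gcount y ys
termination_by xs.length
decreasing_by
  have hle := List.length_dropWhile_le (fun x => decide (x ≤ cur + 4)) xs
  rw [h] at hle
  simp at hle
  omega

theorem gcount_cons (cur x : Int) (xs : List Int) :
    gcount cur (x :: xs) =
      if x ≤ cur + 4 then gcount cur xs else 1 + gcount x xs := by
  split_ifs with hx
  · conv_lhs => rw [gcount]
    rw [List.dropWhile_cons_of_pos (by simpa using hx), gcount]
  · conv_lhs => rw [gcount]
    rw [List.dropWhile_cons_of_neg (by simpa using hx)]

-- A's fold equals the reference greedy count (sortedness not needed for this identity).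
theorem foldA_eq_gcount (xs : List Int) : ∀ (c cur : Int),
    (xs.foldl (fun (s : Int × Int) x => if x > s.2 + 4 then (s.1 + 1, x) else s) (c, cur)).1
      = c + gcount cur xs := by
  induction xs with
  | nil => intro c cur; rw [gcount]; simp
  | cons x xs ih =>
    intro c cur
    rw [List.foldl_cons, gcount_cons]
    by_cases hx : x > cur + 4
    · rw [if_pos hx, if_neg (by omega : ¬ x ≤ cur + 4), ih]
      ring
    · rw [if_neg hx, if_pos (by omega : x ≤ cur + 4), ih]

-- On a sorted list, the bisect_right jump from index i lands exactly past the elements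
-- of the suffix after i that still fit in the container opened at index i.
theorem bisect_step (ws : List Int) (i : Nat) (hs : ws.Pairwise (· ≤ ·))
    (hi : i < ws.length) :
    i < PySem.List.bisectRight ws (ws.getD i 0 + 4) ∧
    PySem.List.bisectRight ws (ws.getD i 0 + 4) ≤ ws.length ∧
    ws.drop (PySem.List.bisectRight ws (ws.getD i 0 + 4)) =
      (ws.drop (i + 1)).dropWhile (fun x => decide (x ≤ ws.getD i 0 + 4)) := by
  set v : Int := ws.getD i 0 + 4 with hv
  obtain ⟨hle, hlt, hge⟩ := PySem.List.bisectRight_spec ws v hs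
  set k := PySem.List.bisectRight ws v with hk
  have hgetD : ws.getD i 0 = ws[i] := List.getD_eq_getElem ws 0 hi
  -- (1) i < k
  have h1 : i < k := by
    by_contra hcon
    have := hge i hi (by omega)
    rw [hgetD] at hv
    omega
  refine ⟨h1, hle, ?_⟩
  -- (3) drop k = dropWhile of the suffix after i
  set l := ws.drop (i + 1) with hl
  set q : Int → Bool := fun x => decide (x ≤ v) with hq
  set s := List.findIdx (fun a => !q a) l with hs'
  have hslen : s ≤ l.length := List.findIdx_le_length
  have hllen : l.length = ws.length - (i + 1) := by simp [hl]
  have hks : k = i + 1 + s := by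
    rcases Nat.lt_trichotomy k (i + 1 + s) with hc | hc | hc
    · exfalso
      have hjk : k - (i + 1) < s := by omega
      have hkl : k < ws.length := by omega
      have hfalse := List.not_of_lt_findIdx hjk
      simp only [hl, List.getElem_drop, hq, Bool.not_eq_false', decide_eq_true_eq] at hfalse
      have hidx : i + 1 + (k - (i + 1)) = k := by omega
      rw [getElem_congr rfl hidx (hidx ▸ (by omega))] at hfalse
      have := hge k hkl (le_refl k)
      omega
    · exact hc
    · exfalso
      have hsl : s < l.length := by omega
      have htrue := @List.findIdx_getElem _ (fun a => !q a) l hsl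
      simp only [← hs'] at htrue
      simp only [hl, List.getElem_drop, hq, Bool.not_eq_true', decide_eq_false_iff_not] at htrue
      have := hlt (i + 1 + s) (by omega) hc
      omega
  rw [hks, List.dropWhile_eq_drop_findIdx_not, ← hs']
  simp only [hl, List.drop_drop]

-- When the loop index is past the end, B's loop returns its accumulator (any fuel).
theorem toysAltGo_stop (f : Nat) (ws : List Int) (i : Nat) (c : Int)
    (h : ¬ i < ws.length) : toysAltGo f ws i c = c := by
  cases f with
  | zero => rfl
  | succ f => simp [toysAltGo, h]

-- B's loop equals the reference greedy count on a sorted list.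
theorem toysAltGo_eq (ws : List Int) (hs : ws.Pairwise (· ≤ ·)) :
    ∀ (f i : Nat) (c : Int), i < ws.length → ws.length - i ≤ f →
    toysAltGo f ws i c = c + 1 + gcount (ws.getD i 0) (ws.drop (i + 1)) := by
  intro f
  induction f with
  | zero => intro i c hi hf; omega
  | succ f ih =>
    intro i c hi hf
    obtain ⟨h1, h2, h3⟩ := bisect_step ws i hs hi
    simp only [toysAltGo, if_pos hi, PySem.List.pyGetD_natCast]
    set v : Int := ws.getD i 0 + 4 with hv
    set k := PySem.List.bisectRight ws v with hk
    rw [gcount]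
    split
    · next heq =>
      rw [heq] at h3
      have hkge : ¬ k < ws.length := by
        intro hkl
        rw [List.drop_eq_getElem_cons hkl] at h3
        exact List.cons_ne_nil _ _ h3
      rw [toysAltGo_stop f ws k (c + 1) hkge]
      ring
    · next y ys heq =>
      rw [heq] at h3
      have hkl : k < ws.length := by
        by_contra hcon
        rw [List.drop_eq_nil_of_le (by omega)] at h3
        exact (List.cons_ne_nil y ys) h3.symm
      rw [List.drop_eq_getElem_cons hkl] at h3
      have hy : y = ws[k] := by injection h3.symm
      have hys : ys = ws.drop (k + 1) := by injection h3.symm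
      rw [hy, hys, ih k (c + 1) hkl (by omega), List.getD_eq_getElem ws 0 hkl]
      ring

-- ===== VERDICT (by name: the statement is the Claim_ definition above) =====
theorem toys_spec : Claim_equal_toys := by
  intro w _ hw
  unfold Spec_toys
  simp only [toys, toys_alt]
  set ws := PySem.List.sorted w (fun x => x) false with hws
  have hs : ws.Pairwise (· ≤ ·) := PySem.List.sorted_pairwise w (fun x => x)
  have hne : ws ≠ [] := by
    rw [hws, Ne, PySem.List.sorted_eq_nil_iff]; exact hw
  have hlen : 0 < ws.length := List.length_pos_iff.mpr hne
  rw [toysAltGo_eq ws hs ws.length 0 0 hlen (by omega)]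
  rw [PySem.List.pyGetD_zero, foldA_eq_gcount, ← List.drop_one]
  ring
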